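-- pv_equiv track=rewrite | github.com/tianshi-wang/movie_genre_prediction | wine_quality_predictor.py | __dicretize_quality
-- ===== SOURCE A (Python) =====
-- def __dicretize_quality(qualities):
--     Y = []
--     for quality in qualities:
--         if quality < 5:
--             Y.append('very_bad')
--         elif quality < 6:
--             Y.append('bad')
--         elif quality < 7:
--             Y.append('ordinary')
--         elif quality < 8:
--             Y.append('good')
--         else:
--             Y.append('very_good')
--     return Y
-- ===== SOURCE B (Python) =====
-- _THRESHOLDS = [5, 6, 7, 8]
-- _LABELS = ['very_bad', 'bad', 'ordinary', 'good', 'very_good']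
--
--
-- def _bisect_right(a, x):
--     lo, hi = 0, len(a)
--     while lo < hi:
--         mid = (lo + hi) // 2
--         if x < a[mid]:
--             hi = mid
--         else:
--             lo = mid + 1
--     return lo
--
--
-- def __dicretize_quality(qualities):
--     return [_LABELS[_bisect_right(_THRESHOLDS, q)] for q in qualities]
-- ===== Notes on version B (the rewrite author's own statement) =====
-- stated objective: idiomatic
-- what changed: Replaces the per-element if/elif comparison cascade with a binary search (bisect_right) over a precomputed threshold table indexing a parallel label table.
import Mathlib
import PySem

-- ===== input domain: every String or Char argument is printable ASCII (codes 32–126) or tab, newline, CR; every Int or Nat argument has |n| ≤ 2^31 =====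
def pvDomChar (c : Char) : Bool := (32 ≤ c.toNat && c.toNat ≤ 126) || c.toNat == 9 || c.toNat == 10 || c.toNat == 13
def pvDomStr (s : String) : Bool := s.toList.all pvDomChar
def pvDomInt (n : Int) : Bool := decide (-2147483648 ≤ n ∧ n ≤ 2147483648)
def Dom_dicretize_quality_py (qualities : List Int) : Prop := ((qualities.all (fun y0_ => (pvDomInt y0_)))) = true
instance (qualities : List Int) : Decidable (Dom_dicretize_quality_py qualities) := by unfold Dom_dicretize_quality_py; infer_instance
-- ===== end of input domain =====

-- B replaces A's if/elif cascade by a bisect_right binary search over a threshold table (idiomatic; same cost).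

-- ===== PORT A =====
def dicretize_quality_py (qualities : List Int) : List String :=
  match qualities with
  | [] => []
  | quality :: rest =>
    (if quality < 5 then "very_bad"
     else if quality < 6 then "bad"
     else if quality < 7 then "ordinary"
     else if quality < 8 then "good"
     else "very_good") :: dicretize_quality_py rest

-- ===== PORT B =====
def pvThresholds : List Int := [5, 6, 7, 8]
def pvLabels : List String := ["very_bad", "bad", "ordinary", "good", "very_good"]

-- _bisect_right's while loop as recursion on hi - lo
def pvBisectGo (a : List Int) (x : Int) (lo hi : Nat) : Nat :=
  if _h : lo < hi then
    let mid := (lo + hi) / 2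
    if x < a.getD mid 0 then pvBisectGo a x lo mid
    else pvBisectGo a x (mid + 1) hi
  else lo
termination_by hi - lo
decreasing_by all_goals omega

def pvBisectRight (a : List Int) (x : Int) : Nat := pvBisectGo a x 0 a.length

-- _LABELS[idx]: idx = bisect_right over 4 thresholds is always 0..4, in range, so getD is exact
def dicretize_quality_py_alt (qualities : List Int) : List String :=
  qualities.map (fun q => pvLabels.getD (pvBisectRight pvThresholds q) "")

-- ===== PRECONDITION & SPEC =====
def Spec_dicretize_quality_py (qualities : List Int) (out : List String) : Prop := out = dicretize_quality_py_alt qualities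
instance (qualities : List Int) (out : List String) : Decidable (Spec_dicretize_quality_py qualities out) := by unfold Spec_dicretize_quality_py; infer_instance

-- ===== CLAIM (what is proved, stated in full; the proofs are below) =====
def Claim_equal_dicretize_quality_py : Prop := ∀ (qualities : List Int), Dom_dicretize_quality_py qualities → Spec_dicretize_quality_py qualities (dicretize_quality_py qualities)

-- ===== LEMMAS AND PROOFS =====

-- binary-search traces over the fixed threshold table, one per bucket
theorem pvBis0 (q : Int) (h : q < 5) : pvBisectGo [5,6,7,8] q 0 4 = 0 := by
  rw [pvBisectGo.eq_def]; norm_num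
  rw [if_pos (by omega), pvBisectGo.eq_def]; norm_num
  rw [if_pos (by omega), pvBisectGo.eq_def]; norm_num
  rw [if_pos (by omega), pvBisectGo.eq_def]; norm_num

theorem pvBis1 (q : Int) (h1 : ¬ q < 5) (h2 : q < 6) : pvBisectGo [5,6,7,8] q 0 4 = 1 := by
  rw [pvBisectGo.eq_def]; norm_num
  rw [if_pos (by omega), pvBisectGo.eq_def]; norm_num
  rw [if_pos (by omega), pvBisectGo.eq_def]; norm_num
  rw [if_neg (by omega), pvBisectGo.eq_def]; norm_num

theorem pvBis2 (q : Int) (h1 : ¬ q < 6) (h2 : q < 7) : pvBisectGo [5,6,7,8] q 0 4 = 2 := by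
  rw [pvBisectGo.eq_def]; norm_num
  rw [if_pos (by omega), pvBisectGo.eq_def]; norm_num
  rw [if_neg (by omega), pvBisectGo.eq_def]; norm_num

theorem pvBis3 (q : Int) (h1 : ¬ q < 7) (h2 : q < 8) : pvBisectGo [5,6,7,8] q 0 4 = 3 := by
  rw [pvBisectGo.eq_def]; norm_num
  rw [if_neg (by omega), pvBisectGo.eq_def]; norm_num
  rw [if_pos (by omega), pvBisectGo.eq_def]; norm_num

theorem pvBis4 (q : Int) (h : ¬ q < 8) : pvBisectGo [5,6,7,8] q 0 4 = 4 := by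
  rw [pvBisectGo.eq_def]; norm_num
  rw [if_neg (by omega), pvBisectGo.eq_def]; norm_num
  rw [if_neg (by omega), pvBisectGo.eq_def]; norm_num

-- per-element agreement of the cascade with the table lookup
theorem pv_elem (q : Int) :
    (if q < 5 then "very_bad"
     else if q < 6 then "bad"
     else if q < 7 then "ordinary"
     else if q < 8 then "good"
     else "very_good") = pvLabels.getD (pvBisectRight pvThresholds q) "" := by
  unfold pvBisectRight pvThresholds pvLabels
  split_ifs with h1 h2 h3 h4
  · rw [show ([5,6,7,8]:List Int).length = 4 from rfl, pvBis0 q h1]; rfl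
  · rw [show ([5,6,7,8]:List Int).length = 4 from rfl, pvBis1 q h1 h2]; rfl
  · rw [show ([5,6,7,8]:List Int).length = 4 from rfl, pvBis2 q h2 h3]; rfl
  · rw [show ([5,6,7,8]:List Int).length = 4 from rfl, pvBis3 q h3 h4]; rfl
  · rw [show ([5,6,7,8]:List Int).length = 4 from rfl, pvBis4 q h4]; rfl

theorem pv_eq_all (qualities : List Int) :
    dicretize_quality_py qualities = dicretize_quality_py_alt qualities := by
  induction qualities with
  | nil => rfl
  | cons q rest ih =>
    simp only [dicretize_quality_py, dicretize_quality_py_alt, List.map_cons] at *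
    rw [ih, pv_elem q]

-- ===== VERDICT (by name: the statement is the Claim_ definition above) =====
theorem dicretize_quality_py_spec : Claim_equal_dicretize_quality_py := by
  intro qualities _
  exact pv_eq_all qualities
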